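-- pv_equiv track=rewrite | github.com/hungd25/projects | CS6390/HW4_P1.py | get_team_wins_year
-- ===== SOURCE A (Python) =====
-- def get_team_wins_year(series_wins):
--     """
--     This function  append the year of to team base on appearences in the list
--     :param series_wins:
--     :return: win_years
--     """
--     win_years = {}  # creates a empty dictionary
--     year = 1903  # initialize year
--     for team in series_wins:
--         if year == 1904 or year == 1994:  # if year is 1904 or 1994, skip it
--             year += 1  # increment year by 1
--         if team in win_years:  # if team(key) in win_years append the year to list
--             win_years[team].append(year)
--         else:
--             win_years[team] = [year]  #if team(key) not in win_years, value is list with year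
--         year += 1  # increment year by 1
--     return win_years  # return win_years
-- ===== SOURCE B (Python) =====
-- def _win_years_from(year, n):
--     """Next n championship years starting at `year`, skipping 1904 and 1994."""
--     years = []
--     while n > 0:
--         if year in (1904, 1994):
--             years.append(year + 1)
--             year += 2
--         else:
--             years.append(year)
--             year += 1
--         n -= 1
--     return years
--
--
-- def get_team_wins_year(series_wins):
--     # Staged inverted-index build: (1) the year stream, (2) the distinct teams in
--     # first-appearance order, (3) a slot map team -> bucket position, (4) distribute
--     # each year into its team's positional bucket, (5) assemble the dict by zipping.
--     years = _win_years_from(1903, len(series_wins))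
--     teams = list(dict.fromkeys(series_wins))
--     slot = {t: i for i, t in enumerate(teams)}
--     buckets = [[] for _ in teams]
--     for t, y in zip(series_wins, years):
--         buckets[slot[t]].append(y)
--     return dict(zip(teams, buckets))
-- ===== Notes on version B (the rewrite author's own statement) =====
-- stated objective: alternative
-- what changed: Replaces A's single pass that mutates a dict of lists while stepping a skip-aware year counter with a staged inverted-index build: an iterative year-stream helper, an ordered dedup of the teams, a slot map from team to bucket position, distribution of the years into positional buckets, and a final zip assembling the dict.
import Mathlib
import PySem

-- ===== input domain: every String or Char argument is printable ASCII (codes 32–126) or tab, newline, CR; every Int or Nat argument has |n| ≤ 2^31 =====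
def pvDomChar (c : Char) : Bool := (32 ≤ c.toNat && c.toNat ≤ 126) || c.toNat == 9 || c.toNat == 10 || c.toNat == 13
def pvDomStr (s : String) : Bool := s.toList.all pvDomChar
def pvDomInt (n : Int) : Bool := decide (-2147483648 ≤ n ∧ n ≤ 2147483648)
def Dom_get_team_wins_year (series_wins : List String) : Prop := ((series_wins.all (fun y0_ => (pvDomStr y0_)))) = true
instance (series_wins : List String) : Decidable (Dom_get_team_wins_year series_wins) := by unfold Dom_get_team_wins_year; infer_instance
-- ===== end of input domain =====

-- B replaces A's single pass (mutable dict + skip-aware year counter) with a staged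
-- inverted-index build: year stream, ordered team dedup, slot map, positional buckets, final zip.

-- ===== PORT A =====
def get_team_wins_year (series_wins : List String) : List (String × List Int) :=
  let st := series_wins.foldl
    (fun (st : PySem.Dict String (List Int) × Int) team =>
      let year : Int := if st.2 = 1904 ∨ st.2 = 1994 then st.2 + 1 else st.2
      let d := if st.1.contains team then st.1.modify team [] (fun l => l ++ [year])
               else st.1.insert team [year]
      (d, year + 1))
    (PySem.Dict.empty, (1903 : Int))
  st.1.items

-- ===== PORT B =====
-- _win_years_from(year, n): the while-loop appending into `years`, counting n down
def pvWinYearsFrom : Int → Nat → List Int → List Int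
  | _, 0, acc => acc
  | y, n + 1, acc =>
      if y = 1904 ∨ y = 1994 then pvWinYearsFrom (y + 2) n (acc ++ [y + 1])
      else pvWinYearsFrom (y + 1) n (acc ++ [y])

-- dict(zip(teams, buckets)) over the distinct `teams` = that association list;
-- buckets[slot[t]].append(y) = pySetD at index slot[t] with the appended bucket
def get_team_wins_year_alt (series_wins : List String) : List (String × List Int) :=
  let years := pvWinYearsFrom 1903 series_wins.length []
  let teams := PySem.List.dedup series_wins
  let slot := (PySem.List.enumerate teams 0).foldl
    (fun (d : PySem.Dict String Int) p => d.insert p.2 p.1) PySem.Dict.empty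
  let buckets : List (List Int) := teams.map (fun _ => [])
  let buckets := (series_wins.zip years).foldl
    (fun bs p =>
      let i := slot.getD p.1 0
      PySem.List.pySetD bs i (PySem.List.pyGetD bs i [] ++ [p.2]))
    buckets
  teams.zip buckets

-- ===== PRECONDITION & SPEC =====
def Spec_get_team_wins_year (series_wins : List String) (out : List (String × List Int)) : Prop := out = get_team_wins_year_alt series_wins
instance (series_wins : List String) (out : List (String × List Int)) : Decidable (Spec_get_team_wins_year series_wins out) := by unfold Spec_get_team_wins_year; infer_instance

-- ===== CLAIM (what is proved, stated in full; the proofs are below) =====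
def Claim_equal_get_team_wins_year : Prop := ∀ (series_wins : List String), Dom_get_team_wins_year series_wins → Spec_get_team_wins_year series_wins (get_team_wins_year series_wins)

-- ===== LEMMAS AND PROOFS =====

-- cons-form of the year stream (proof-side normal form of pvWinYearsFrom)
def pvYrsC : Int → Nat → List Int
  | _, 0 => []
  | y, n + 1 => if y = 1904 ∨ y = 1994 then (y + 1) :: pvYrsC (y + 2) n
                else y :: pvYrsC (y + 1) n

theorem pvWinYearsFrom_eq (n : Nat) : ∀ (y : Int) (acc : List Int),
    pvWinYearsFrom y n acc = acc ++ pvYrsC y n := by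
  induction n with
  | zero => intro y acc; simp [pvWinYearsFrom, pvYrsC]
  | succ n ih =>
    intro y acc
    by_cases h : y = 1904 ∨ y = 1994 <;>
      simp [pvWinYearsFrom, pvYrsC, h, ih]

theorem pvYrsC_length (n : Nat) : ∀ (y : Int), (pvYrsC y n).length = n := by
  induction n with
  | zero => intro y; rfl
  | succ n ih =>
    intro y
    by_cases h : y = 1904 ∨ y = 1994 <;> simp [pvYrsC, h, ih]

theorem pvStep_eq (d : PySem.Dict String (List Int)) (team : String) (year : Int) :
    (if d.contains team then d.modify team [] (fun l => l ++ [year])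
     else d.insert team [year]) = d.modify team [] (fun l => l ++ [year]) := by
  by_cases h : d.contains team
  · simp [h]
  · simp only [h, Bool.false_eq_true, if_false]
    have hc : d.contains team = false := by simpa using h
    simp [PySem.Dict.modify, PySem.Dict.getD_of_not_contains (h := hc)]

-- A's counter loop is the modify-append fold over the teams zipped with the year stream
theorem pvFold_eq (ts : List String) : ∀ (d : PySem.Dict String (List Int)) (y : Int),
    (ts.foldl
      (fun (st : PySem.Dict String (List Int) × Int) team =>
        let year : Int := if st.2 = 1904 ∨ st.2 = 1994 then st.2 + 1 else st.2
        let d := if st.1.contains team then st.1.modify team [] (fun l => l ++ [year])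
                 else st.1.insert team [year]
        (d, year + 1))
      (d, y)).1 =
    ((ts.zip (pvYrsC y ts.length)).foldl
      (fun d p => d.modify p.1 [] (fun l => l ++ [p.2])) d) := by
  induction ts with
  | nil => intro d y; simp [pvYrsC]
  | cons t ts ih =>
    intro d y
    by_cases hb : y = 1904 ∨ y = 1994
    · rw [show pvYrsC y (t :: ts).length = (y + 1) :: pvYrsC (y + 2) ts.length from by
        simp [pvYrsC, hb]]
      simp only [List.foldl_cons, List.zip_cons_cons, if_pos hb]
      rw [pvStep_eq]
      have h2 : y + 1 + 1 = y + 2 := by ring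
      rw [h2]
      exact ih _ (y + 2)
    · rw [show pvYrsC y (t :: ts).length = y :: pvYrsC (y + 1) ts.length from by
        simp [pvYrsC, hb]]
      simp only [List.foldl_cons, List.zip_cons_cons, if_neg hb]
      rw [pvStep_eq]
      exact ih _ (y + 1)

-- the bucket-distribution fold preserves the number of buckets
theorem pvFoldLen (f : String → Int) (l : List (String × Int)) : ∀ (bs : List (List Int)),
    (l.foldl (fun bs p =>
      PySem.List.pySetD bs (f p.1) (PySem.List.pyGetD bs (f p.1) [] ++ [p.2])) bs).length
    = bs.length := by
  induction l with
  | nil => intro bs; rfl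
  | cons p l ih =>
    intro bs
    simp only [List.foldl_cons]
    rw [ih]
    exact PySem.List.length_pySetD _ _ _

-- bucket j after the distribution fold = its old content ++ the years of pairs routed to j
theorem pvBucketGet (f : String → Int) (l : List (String × Int)) : ∀ (bs : List (List Int)),
    (∀ p ∈ l, 0 ≤ f p.1 ∧ (f p.1).toNat < bs.length) → ∀ (j : Nat),
    (l.foldl (fun bs p =>
      PySem.List.pySetD bs (f p.1) (PySem.List.pyGetD bs (f p.1) [] ++ [p.2])) bs)[j]?
    = (bs[j]?).map (fun b => b ++ (l.filter (fun p => f p.1 == (j : Int))).map (fun p => p.2)) := by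
  induction l with
  | nil => intro bs _ j; simp
  | cons p l ih =>
    intro bs hall j
    obtain ⟨h0, hlt⟩ := hall p (List.mem_cons_self ..)
    have hInt : f p.1 < (bs.length : Int) := by omega
    simp only [List.foldl_cons]
    rw [PySem.List.pySetD_of_nonneg _ _ h0, PySem.List.pyGetD_eq_getElem _ _ h0 hInt]
    rw [ih _ (by intro q hq; simpa using hall q (List.mem_cons_of_mem _ hq)) j]
    rw [List.getElem?_set]
    by_cases hij : (f p.1).toNat = j
    · subst hij
      rw [if_pos rfl, if_pos hlt, List.getElem?_eq_getElem hlt]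
      have hfix : ((((f p.1).toNat : Nat)) : Int) = f p.1 := by omega
      rw [hfix]
      simp [List.append_assoc]
    · have hfj : (f p.1 == (j : Int)) = false := by simp; omega
      rw [if_neg hij]
      simp [hfj]

-- the slot dict maps the j-th distinct team to j
theorem pvSlotItems (teams : List String) (hnd : teams.Nodup) :
    ((PySem.List.enumerate teams 0).foldl
      (fun (d : PySem.Dict String Int) p => d.insert p.2 p.1) PySem.Dict.empty).items
    = (PySem.List.enumerate teams 0).map (fun p => (p.2, p.1)) := by
  rw [PySem.Dict.items_foldl_insert_fresh (PySem.List.enumerate teams 0)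
    (fun p => p.2) (fun p => p.1) PySem.Dict.empty
    (by intro a _; simp)
    (by rw [PySem.List.map_snd_enumerate]; exact hnd)]
  simp [PySem.Dict.empty]

theorem pvSlotKeys (teams : List String) (hnd : teams.Nodup) :
    ((PySem.List.enumerate teams 0).foldl
      (fun (d : PySem.Dict String Int) p => d.insert p.2 p.1) PySem.Dict.empty).keys
    = teams := by
  simp only [PySem.Dict.keys, pvSlotItems teams hnd, List.map_map]
  exact PySem.List.map_snd_enumerate teams 0

theorem pvSlotGet (teams : List String) (hnd : teams.Nodup) (j : Nat) (hj : j < teams.length) :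
    ((PySem.List.enumerate teams 0).foldl
      (fun (d : PySem.Dict String Int) p => d.insert p.2 p.1) PySem.Dict.empty).getD teams[j] 0
    = (j : Int) := by
  apply PySem.Dict.getD_of_mem_items
  · rw [pvSlotItems teams hnd]
    have hj' : j < (PySem.List.enumerate teams 0).length := by
      rw [PySem.List.length_enumerate]; exact hj
    have hmem : ((0 : Int) + j, teams[j]) ∈ PySem.List.enumerate teams 0 := by
      rw [← PySem.List.getElem_enumerate teams 0 j hj']
      exact List.getElem_mem _
    have := List.mem_map_of_mem (f := fun (p : Int × String) => (p.2, p.1)) hmem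
    simpa using this
  · rw [pvSlotKeys teams hnd]; exact hnd

-- ===== VERDICT (by name: the statement is the Claim_ definition above) =====
theorem get_team_wins_year_spec : Claim_equal_get_team_wins_year := by
  intro ts _
  unfold Spec_get_team_wins_year
  simp only [get_team_wins_year, get_team_wins_year_alt]
  rw [pvFold_eq, pvWinYearsFrom_eq, List.nil_append]
  set teams := PySem.List.dedup ts with hteams
  have hndt : teams.Nodup := PySem.List.nodup_dedup ts
  set slot := (PySem.List.enumerate teams 0).foldl
    (fun (d : PySem.Dict String Int) p => d.insert p.2 p.1) PySem.Dict.empty with hslot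
  set l := ts.zip (pvYrsC 1903 ts.length) with hl
  -- members of the zip have first components in ts, hence in teams, with a slot below teams.length
  have hmem_fst : ∀ p ∈ l, p.1 ∈ teams := by
    intro p hp
    have := (List.of_mem_zip hp).1
    rw [hteams]
    simpa [PySem.List.mem_dedup] using this
  have hslot_idx : ∀ t ∈ teams, ∃ (i : Nat) (hi : i < teams.length),
      teams[i] = t ∧ slot.getD t 0 = (i : Int) := by
    intro t ht
    obtain ⟨i, hi, hti⟩ := List.mem_iff_getElem.mp ht
    exact ⟨i, hi, hti, by rw [← hti, hslot]; exact pvSlotGet teams hndt i hi⟩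
  -- A's dict fold, read off as items over its (distinct) keys
  have hnd : ((l.foldl (fun d p => d.modify p.1 [] (fun v => v ++ [p.2]))
      (PySem.Dict.empty : PySem.Dict String (List Int)))).keys.Nodup := by
    apply PySem.Dict.nodup_keys_foldl_modify_key
    simp
  have hfst : l.map Prod.fst = ts := by
    rw [hl]
    exact List.map_fst_zip ((pvYrsC_length ts.length 1903).symm.le)
  have hkeys : ((l.foldl (fun d p => d.modify p.1 [] (fun v => v ++ [p.2]))
      (PySem.Dict.empty : PySem.Dict String (List Int)))).keys = teams := by
    rw [PySem.Dict.keys_foldl_modify_key (key := Prod.fst), hfst]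
    simp [hteams, PySem.Dict.keys_empty, PySem.List.dedup_eq_ofList, PySem.Set.ofList_eq_foldl,
      PySem.Set.update]
  rw [PySem.Dict.items_eq_map_keys _ hnd [], hkeys]
  -- B's buckets, read off pointwise
  have hball : ∀ p ∈ l, 0 ≤ slot.getD p.1 0 ∧ (slot.getD p.1 0).toNat
      < (teams.map (fun _ => ([] : List Int))).length := by
    intro p hp
    obtain ⟨i, hi, _, hv⟩ := hslot_idx p.1 (hmem_fst p hp)
    rw [hv]
    simp [hi]
  have hblen : (l.foldl (fun bs p =>
      PySem.List.pySetD bs (slot.getD p.1 0) (PySem.List.pyGetD bs (slot.getD p.1 0) [] ++ [p.2]))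
      (teams.map (fun _ => ([] : List Int)))).length = teams.length := by
    have h := pvFoldLen (fun t => slot.getD t 0) l (teams.map (fun _ => ([] : List Int)))
    rw [List.length_map] at h
    exact h
  have hbget : ∀ (j : Nat), (l.foldl (fun bs p =>
      PySem.List.pySetD bs (slot.getD p.1 0) (PySem.List.pyGetD bs (slot.getD p.1 0) [] ++ [p.2]))
      (teams.map (fun _ => ([] : List Int))))[j]?
      = ((teams.map (fun _ => ([] : List Int)))[j]?).map
        (fun b => b ++ (l.filter (fun p => slot.getD p.1 0 == (j : Int))).map (fun p => p.2)) :=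
    fun j => pvBucketGet (fun t => slot.getD t 0) l _ hball j
  -- elementwise equality of the two association lists
  apply List.ext_getElem
  · rw [List.length_map, List.length_zip, hblen]
    omega
  · intro j hj1 hj2
    have hjt : j < teams.length := by simpa using hj1
    have hjb : j < (l.foldl (fun bs p =>
        PySem.List.pySetD bs (slot.getD p.1 0) (PySem.List.pyGetD bs (slot.getD p.1 0) [] ++ [p.2]))
        (teams.map (fun _ => ([] : List Int)))).length := by
      rw [hblen]; exact hjt
    rw [List.getElem_zip, List.getElem_map]
    have hbj := hbget j
    rw [List.getElem?_eq_getElem hjb, List.getElem?_map, List.getElem?_eq_getElem hjt] at hbj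
    have hbucket : (l.foldl (fun bs p =>
        PySem.List.pySetD bs (slot.getD p.1 0) (PySem.List.pyGetD bs (slot.getD p.1 0) [] ++ [p.2]))
        (teams.map (fun _ => ([] : List Int))))[j]
        = (l.filter (fun p => slot.getD p.1 0 == (j : Int))).map (fun p => p.2) := by
      simpa using hbj
    rw [PySem.Dict.getD_foldl_modify_append, PySem.Dict.getD_empty, List.nil_append, hbucket]
    congr 1
    congr 1
    apply List.filter_congr
    intro p hp
    obtain ⟨i, hi, hti, hv⟩ := hslot_idx p.1 (hmem_fst p hp)
    rw [hv, ← hti]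
    by_cases hijeq : i = j
    · subst hijeq; simp
    · have hne : teams[i] ≠ teams[j] := fun hcon =>
        hijeq ((List.Nodup.getElem_inj_iff hndt).mp hcon)
      have h1 : (((i : Nat) : Int) == ((j : Nat) : Int)) = false := by simp; omega
      have h2 : (teams[i] == teams[j]) = false := by simp [hne]
      rw [h1, h2]
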